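-- pv_equiv track=rewrite | github.com/MorseWayne/DeepCurrents | src/services/event_enrichment.py | _has_action_conflict
-- ===== SOURCE A (Python) =====
-- ACTION_CONFLICTS = {
--     "rate_cut": {"rate_hike"},
--     "rate_hike": {"rate_cut"},
--     "approval": {"rejection"},
--     "rejection": {"approval"},
--     "surge": {"slump"},
--     "slump": {"surge"},
-- }
--
-- def _has_action_conflict(
--
--     article_actions: set[str],
--     dominant_actions: set[str],
-- ) -> bool:
--     if not article_actions or not dominant_actions:
--         return False
--     for action in article_actions:
--         if any(opposite in dominant_actions for opposite in ACTION_CONFLICTS.get(action, set())):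
--             return True
--     return False
-- ===== SOURCE B (Python) =====
-- # The conflict table consists of three symmetric pairs; iterate over those
-- # pairs and test both directions against the two input sets.
-- CONFLICT_PAIRS = [
--     ("rate_cut", "rate_hike"),
--     ("approval", "rejection"),
--     ("surge", "slump"),
-- ]
--
-- def _has_action_conflict(article_actions, dominant_actions):
--     return any(
--         (x in article_actions and y in dominant_actions)
--         or (y in article_actions and x in dominant_actions)
--         for x, y in CONFLICT_PAIRS
--     )
-- ===== Notes on version B (the rewrite author's own statement) =====
-- stated objective: faster
-- what changed: B drops the dict-of-sets and the scan over article_actions entirely: it iterates over the three constant symmetric conflict pairs and tests each pair's two directions by set membership, instead of A's guarded loop over article_actions with a dict lookup and inner any() scan.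
import Mathlib
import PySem

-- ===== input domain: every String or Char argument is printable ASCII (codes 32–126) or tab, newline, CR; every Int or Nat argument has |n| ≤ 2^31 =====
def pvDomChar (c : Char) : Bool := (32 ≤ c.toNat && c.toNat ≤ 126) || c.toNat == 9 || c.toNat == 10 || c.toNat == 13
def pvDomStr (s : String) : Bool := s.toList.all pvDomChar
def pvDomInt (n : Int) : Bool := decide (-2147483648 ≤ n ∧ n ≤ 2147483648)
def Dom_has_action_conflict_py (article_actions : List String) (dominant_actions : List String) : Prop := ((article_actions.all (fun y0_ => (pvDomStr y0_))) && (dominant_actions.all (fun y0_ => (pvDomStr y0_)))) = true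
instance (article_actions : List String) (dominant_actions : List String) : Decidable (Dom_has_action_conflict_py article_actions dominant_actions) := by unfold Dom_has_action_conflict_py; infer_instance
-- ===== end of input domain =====

-- B iterates over the three constant symmetric conflict pairs and tests both directions
-- against the two sets, instead of A's scan over article_actions with a dict lookup (simpler decomposition).
-- Inputs are Python sets (List String of distinct elements); result is order-independent.

-- ===== PORT A =====
def ACTION_CONFLICTS : PySem.Dict String (PySem.Set String) :=
  PySem.Dict.ofList
    [("rate_cut", ["rate_hike"]), ("rate_hike", ["rate_cut"]),
     ("approval", ["rejection"]), ("rejection", ["approval"]),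
     ("surge", ["slump"]), ("slump", ["surge"])]

-- the 'for action in article_actions: if any(...): return True' loop
def pvLoopA (dominant_actions : List String) : List String → Bool
  | [] => false
  | action :: rest =>
      if (PySem.Dict.getD ACTION_CONFLICTS action []).any
          (fun opposite => PySem.Set.contains dominant_actions opposite) then true
      else pvLoopA dominant_actions rest

def has_action_conflict_py (article_actions : List String) (dominant_actions : List String) : Bool :=
  if article_actions.isEmpty || dominant_actions.isEmpty then false
  else pvLoopA dominant_actions article_actions

-- ===== PORT B =====
def CONFLICT_PAIRS : List (String × String) :=
  [("rate_cut", "rate_hike"), ("approval", "rejection"), ("surge", "slump")]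

def has_action_conflict_py_alt (article_actions : List String) (dominant_actions : List String) : Bool :=
  CONFLICT_PAIRS.any (fun p =>
    (PySem.Set.contains article_actions p.1 && PySem.Set.contains dominant_actions p.2)
    || (PySem.Set.contains article_actions p.2 && PySem.Set.contains dominant_actions p.1))

-- ===== PRECONDITION & SPEC =====
def Spec_has_action_conflict_py (article_actions : List String) (dominant_actions : List String) (out : Bool) : Prop := out = has_action_conflict_py_alt article_actions dominant_actions
instance (article_actions : List String) (dominant_actions : List String) (out : Bool) : Decidable (Spec_has_action_conflict_py article_actions dominant_actions out) := by unfold Spec_has_action_conflict_py; infer_instance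

-- ===== CLAIM (what is proved, stated in full; the proofs are below) =====
def Claim_equal_has_action_conflict_py : Prop := ∀ (article_actions : List String) (dominant_actions : List String), Dom_has_action_conflict_py article_actions dominant_actions → Spec_has_action_conflict_py article_actions dominant_actions (has_action_conflict_py article_actions dominant_actions)

-- ===== LEMMAS AND PROOFS =====

theorem pvLoopA_eq_true_iff (d : List String) (l : List String) :
    pvLoopA d l = true ↔
      ∃ x ∈ l, ∃ o ∈ PySem.Dict.getD ACTION_CONFLICTS x [], o ∈ d := by
  induction l with
  | nil => simp [pvLoopA]
  | cons a rest ih =>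
    simp only [pvLoopA]
    by_cases h : (PySem.Dict.getD ACTION_CONFLICTS a []).any
        (fun opposite => PySem.Set.contains d opposite) = true
    · rw [if_pos h]
      obtain ⟨o, ho, hd⟩ := List.any_eq_true.mp h
      exact iff_of_true rfl ⟨a, by simp, o, ho, (PySem.Set.contains_iff _ _).mp hd⟩
    · rw [if_neg h, ih]
      constructor
      · rintro ⟨x, hx, o, ho, hd⟩
        exact ⟨x, List.mem_cons_of_mem _ hx, o, ho, hd⟩
      · rintro ⟨x, hx, o, ho, hd⟩
        rcases List.mem_cons.mp hx with rfl | hx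
        · exact absurd (List.any_eq_true.mpr ⟨o, ho, (PySem.Set.contains_iff _ _).mpr hd⟩) h
        · exact ⟨x, hx, o, ho, hd⟩

-- the dict's content, as the list of directed conflict edges
theorem pvConflicts_mem (x o : String) :
    o ∈ PySem.Dict.getD ACTION_CONFLICTS x [] ↔
      (x, o) ∈ [("rate_cut", "rate_hike"), ("rate_hike", "rate_cut"),
                ("approval", "rejection"), ("rejection", "approval"),
                ("surge", "slump"), ("slump", "surge")] := by
  have h : ACTION_CONFLICTS = PySem.Dict.mk
    [("rate_cut", ["rate_hike"]), ("rate_hike", ["rate_cut"]),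
     ("approval", ["rejection"]), ("rejection", ["approval"]),
     ("surge", ["slump"]), ("slump", ["surge"])] := by decide
  rw [h]
  clear h
  simp only [PySem.Dict.getD, PySem.Dict.get?_mk_cons, beq_iff_eq,
    List.mem_cons, List.not_mem_nil, Prod.mk.injEq, or_false]
  split_ifs with h1 h2 h3 h4 h5 h6 <;> subst_vars <;>
    simp [PySem.Dict.get?, Option.getD] <;> tauto

theorem pvB_eq_true_iff (a d : List String) :
    has_action_conflict_py_alt a d = true ↔
      ("rate_cut" ∈ a ∧ "rate_hike" ∈ d) ∨ ("rate_hike" ∈ a ∧ "rate_cut" ∈ d) ∨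
      ("approval" ∈ a ∧ "rejection" ∈ d) ∨ ("rejection" ∈ a ∧ "approval" ∈ d) ∨
      ("surge" ∈ a ∧ "slump" ∈ d) ∨ ("slump" ∈ a ∧ "surge" ∈ d) := by
  simp [has_action_conflict_py_alt, CONFLICT_PAIRS]
  tauto

theorem pvA_eq_true_iff (a d : List String) :
    has_action_conflict_py a d = true ↔
      ("rate_cut" ∈ a ∧ "rate_hike" ∈ d) ∨ ("rate_hike" ∈ a ∧ "rate_cut" ∈ d) ∨
      ("approval" ∈ a ∧ "rejection" ∈ d) ∨ ("rejection" ∈ a ∧ "approval" ∈ d) ∨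
      ("surge" ∈ a ∧ "slump" ∈ d) ∨ ("slump" ∈ a ∧ "surge" ∈ d) := by
  unfold has_action_conflict_py
  split_ifs with hg
  · -- one of the lists is empty: no membership conjunct can hold
    rcases Bool.or_eq_true_iff.mp hg with h | h <;>
      · rw [List.isEmpty_iff] at h
        subst h
        simp
  · rw [pvLoopA_eq_true_iff]
    constructor
    · rintro ⟨x, hx, o, ho, hd⟩
      rw [pvConflicts_mem] at ho
      simp only [List.mem_cons, List.not_mem_nil, or_false, Prod.mk.injEq] at ho
      rcases ho with ⟨rfl, rfl⟩ | ⟨rfl, rfl⟩ | ⟨rfl, rfl⟩ | ⟨rfl, rfl⟩ | ⟨rfl, rfl⟩ | ⟨rfl, rfl⟩ <;>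
        tauto
    · intro h
      rcases h with ⟨ha, hd⟩ | ⟨ha, hd⟩ | ⟨ha, hd⟩ | ⟨ha, hd⟩ | ⟨ha, hd⟩ | ⟨ha, hd⟩ <;>
        exact ⟨_, ha, _, (pvConflicts_mem _ _).mpr (by simp), hd⟩

-- ===== VERDICT =====
theorem has_action_conflict_py_spec : Claim_equal_has_action_conflict_py := by
  intro a d _
  unfold Spec_has_action_conflict_py
  rw [Bool.eq_iff_iff, pvA_eq_true_iff, pvB_eq_true_iff]
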